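-- pv_equiv track=rewrite | github.com/Joset2804/TA1_IA | hillClimbing.py | findBestBox
-- ===== SOURCE A (Python) =====
-- def heuristic(container,newBox,containerSize):
--     h = 0
--     for box in container:
--         h += box
--     h += newBox
--     if h > containerSize:
--         return 0
--     else:
--         return h
--
-- def findBestBox(container,boxes,containerSize):
--     heuristics = []
--     for box in boxes:
--         heuristics.append(heuristic(container,box,containerSize))
--     if heuristics:
--         max_h = max(heuristics)
--         if max_h != 0:
--             selection = heuristics.index(max_h)
--             container.append(boxes.pop(selection))
--             return True
--     return False
-- ===== SOURCE B (Python) =====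
-- def findBestBox(container, boxes, containerSize):
--     # Sum the container once, then a single pass over boxes tracking the
--     # maximum heuristic and the index of its first occurrence.
--     s = sum(container)
--     best = None
--     best_i = -1
--     for i, box in enumerate(boxes):
--         v = s + box
--         if v > containerSize:
--             v = 0
--         if best is None or v > best:
--             best = v
--             best_i = i
--     if best is not None and best != 0:
--         container.append(boxes.pop(best_i))
--         return True
--     return False
-- ===== Notes on version B (the rewrite author's own statement) =====
-- stated objective: faster
-- what changed: B sums the container once and finds the max heuristic and its first index in a single pass, instead of re-summing the container for every box, building a heuristics list and rescanning it with max() and .index().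
import Mathlib
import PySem

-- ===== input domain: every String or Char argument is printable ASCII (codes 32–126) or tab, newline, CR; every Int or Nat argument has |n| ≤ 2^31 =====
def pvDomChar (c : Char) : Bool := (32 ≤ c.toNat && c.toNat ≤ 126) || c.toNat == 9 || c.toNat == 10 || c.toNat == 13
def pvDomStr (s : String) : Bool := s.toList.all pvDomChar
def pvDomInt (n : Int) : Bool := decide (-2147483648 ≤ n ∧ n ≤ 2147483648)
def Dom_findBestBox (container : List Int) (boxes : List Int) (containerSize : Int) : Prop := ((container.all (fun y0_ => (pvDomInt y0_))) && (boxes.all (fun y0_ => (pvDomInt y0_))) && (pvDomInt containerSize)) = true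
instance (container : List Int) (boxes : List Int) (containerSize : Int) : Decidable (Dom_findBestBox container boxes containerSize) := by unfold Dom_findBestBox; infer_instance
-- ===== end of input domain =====

-- B sums the container once and finds the max heuristic and its first index in a single
-- pass (O(m+n) instead of A's O(m*n)). Both A and B mutate container/boxes in Python
-- identically; the equivalence proved here is about the RETURN value only.

-- ===== PORT A =====
def heuristicA (container : List Int) (newBox : Int) (containerSize : Int) : Int :=
  let h := container.foldl (fun a box => a + box) 0
  let h := h + newBox
  if h > containerSize then 0 else h

def findBestBox (container : List Int) (boxes : List Int) (containerSize : Int) : Bool :=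
  let heuristics := boxes.foldl (fun acc box => acc ++ [heuristicA container box containerSize]) []
  if heuristics ≠ [] then
    match PySem.List.max? heuristics (fun y => y) with
    | none => false
    | some m => decide (m ≠ 0)
  else false

-- ===== PORT B =====
-- one loop step of Source B: v = s+box capped to 0 if over size; track (best, best_i)
def altStep (s : Int) (containerSize : Int) (acc : Option Int × Int) (p : Int × Int) : Option Int × Int :=
  let v := s + p.2
  let v := if v > containerSize then 0 else v
  match acc.1 with
  | none => (some v, p.1)
  | some b => if v > b then (some v, p.1) else acc

def findBestBox_alt (container : List Int) (boxes : List Int) (containerSize : Int) : Bool :=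
  let s := container.foldl (fun a b => a + b) 0
  let r := (PySem.List.enumerate boxes).foldl (altStep s containerSize) (none, -1)
  match r.1 with
  | none => false
  | some b => decide (b ≠ 0)

-- ===== PRECONDITION & SPEC =====
def Spec_findBestBox (container : List Int) (boxes : List Int) (containerSize : Int) (out : Bool) : Prop := out = findBestBox_alt container boxes containerSize
instance (container : List Int) (boxes : List Int) (containerSize : Int) (out : Bool) : Decidable (Spec_findBestBox container boxes containerSize out) := by unfold Spec_findBestBox; infer_instance

-- ===== CLAIM (what is proved, stated in full; the proofs are below) =====
def Claim_equal_findBestBox : Prop := ∀ (container : List Int) (boxes : List Int) (containerSize : Int), Dom_findBestBox container boxes containerSize → Spec_findBestBox container boxes containerSize (findBestBox container boxes containerSize)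

-- ===== LEMMAS AND PROOFS =====

-- the common per-box value
def hval (s containerSize box : Int) : Int :=
  if s + box > containerSize then 0 else s + box

theorem heuristicA_eq (container : List Int) (box containerSize : Int) :
    heuristicA container box containerSize
      = hval (container.foldl (fun a b => a + b) 0) containerSize box := by
  simp [heuristicA, hval]

-- A's list-building fold is map
theorem foldl_append_map (g : Int → Int) :
    ∀ (xs : List Int) (acc : List Int),
      xs.foldl (fun a b => a ++ [g b]) acc = acc ++ xs.map g := by
  intro xs
  induction xs with
  | nil => simp
  | cons x t ih => intro acc; simp [List.foldl, ih]

-- B's fold keeps a 'some' running max in its first component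
theorem altStep_some (s cs b bi : Int) (y : Int × Int) :
    altStep s cs (some b, bi) y
      = if hval s cs y.2 > b then (some (hval s cs y.2), y.1) else (some b, bi) := by
  simp only [altStep, hval]

-- B's fold keeps a 'some' running max in its first component
theorem altStep_foldl_some (s cs : Int) :
    ∀ (ys : List (Int × Int)) (b : Int) (bi : Int),
      (ys.foldl (altStep s cs) (some b, bi)).1
        = some (ys.foldl (fun a p => max a (hval s cs p.2)) b) := by
  intro ys
  induction ys with
  | nil => simp
  | cons y t ih =>
      intro b bi
      simp only [List.foldl, altStep_some]
      split
      · rename_i h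
        rw [ih, max_eq_right (le_of_lt h)]
      · rename_i h
        rw [ih, max_eq_left (not_lt.mp h)]

theorem altStep_first (s cs : Int) (y : Int × Int) :
    altStep s cs (none, -1) y = (some (hval s cs y.2), y.1) := by
  simp [altStep, hval]

theorem foldl_max_snd (s cs : Int) :
    ∀ (t : List (Int × Int)) (b : Int),
      t.foldl (fun a p => max a (hval s cs p.2)) b
        = ((t.map (·.2)).map (hval s cs)).foldl max b := by
  intro t
  induction t with
  | nil => simp
  | cons y u ih => intro b; simp [List.foldl, ih]

theorem findBestBox_spec' (container boxes : List Int) (containerSize : Int) :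
    findBestBox container boxes containerSize = findBestBox_alt container boxes containerSize := by
  cases boxes with
  | nil =>
      simp [findBestBox, findBestBox_alt, PySem.List.enumerate_nil]
  | cons x t =>
      have hs : (t.map (fun box => heuristicA container box containerSize))
          = t.map (hval (container.foldl (fun a b => a + b) 0) containerSize) := by
        simp [heuristicA_eq]
      simp only [findBestBox, findBestBox_alt,
        foldl_append_map (fun box => heuristicA container box containerSize),
        List.nil_append, List.map_cons,
        PySem.List.enumerate_cons, List.foldl_cons, altStep_first,
        altStep_foldl_some, PySem.List.max?_id_cons]
      rw [hs, heuristicA_eq, foldl_max_snd, PySem.List.map_snd_enumerate]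
      simp

-- ===== VERDICT (by name: the statement is the Claim_ definition above) =====
theorem findBestBox_spec : Claim_equal_findBestBox := by
  intro container boxes containerSize _
  unfold Spec_findBestBox
  exact findBestBox_spec' container boxes containerSize
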